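-- pv_equiv track=rewrite | github.com/Myakshin/carlin | depend.py | kron_power
-- ===== SOURCE A (Python) =====
-- def kron_prod(x, y):
--     return [x[i] * y[j] for i in range(len(x)) for j in range(len(y))]
--
-- def kron_power(x, i):
--     if i > 2:
--         return kron_prod(x, kron_power(x, i - 1))
--     elif i == 2:
--         return kron_prod(x, x)
--     elif i == 1:
--         return x
--     else:
--         raise ValueError('index i should be an integer >= 1')
-- ===== SOURCE B (Python) =====
-- def kron_prod(x, y):
--     return [a * b for a in x for b in y]
--
-- def kron_power(x, i):
--     if i < 1:
--         raise ValueError('index i should be an integer >= 1')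
--     result = x
--     k = i
--     while k > 1:
--         result = kron_prod(x, result)
--         k -= 1
--     return result
-- ===== Notes on version B (the rewrite author's own statement) =====
-- stated objective: alternative
-- what changed: Replaces A's recursion on i with an iterative while-loop accumulating the product, and kron_prod iterates values directly instead of index ranges.
import Mathlib
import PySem

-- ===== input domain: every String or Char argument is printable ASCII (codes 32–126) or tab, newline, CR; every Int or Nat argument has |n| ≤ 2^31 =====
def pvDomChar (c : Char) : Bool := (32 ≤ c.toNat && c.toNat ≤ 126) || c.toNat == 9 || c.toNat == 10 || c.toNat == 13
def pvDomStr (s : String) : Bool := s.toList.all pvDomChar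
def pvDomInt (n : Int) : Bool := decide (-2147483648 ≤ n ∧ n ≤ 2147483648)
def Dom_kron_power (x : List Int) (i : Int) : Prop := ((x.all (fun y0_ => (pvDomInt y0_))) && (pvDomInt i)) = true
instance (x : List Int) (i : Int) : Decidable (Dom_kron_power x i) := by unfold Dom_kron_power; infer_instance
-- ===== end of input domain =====

-- B replaces A's recursion on i by an iterative while-loop; equivalence proved for all i ≥ 1 (A raises ValueError otherwise).


-- ===== PORT A =====
-- A's kron_prod: indices over range(len(x)) × range(len(y)); indices are always in range, so getD is exact.
def kron_prodA (x y : List Int) : List Int :=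
  (List.range x.length).flatMap (fun i => (List.range y.length).map (fun j => x.getD i 0 * y.getD j 0))

def kron_power (x : List Int) (i : Int) : List Int :=
  if i > 2 then kron_prodA x (kron_power x (i - 1))
  else if i = 2 then kron_prodA x x
  else x   -- i = 1 returns x; i < 1 raises ValueError in Python (excluded by Pre_)
termination_by i.toNat
decreasing_by omega

-- ===== PORT B =====
-- B's kron_prod: iterates the values directly.
def kron_prodB (x y : List Int) : List Int :=
  x.flatMap (fun a => y.map (fun b => a * b))

-- the while-loop of B: while k > 1: result = kron_prod(x, result); k -= 1
def kronLoop (x result : List Int) (k : Int) : List Int :=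
  if k > 1 then kronLoop x (kron_prodB x result) (k - 1) else result
termination_by k.toNat
decreasing_by omega

def kron_power_alt (x : List Int) (i : Int) : List Int :=
  if i < 1 then x   -- raises ValueError in Python (excluded by Pre_)
  else kronLoop x x i

-- ===== PRECONDITION & SPEC =====
-- Pre_ excludes exactly i < 1, where the Python A raises ValueError.
def Pre_kron_power (x : List Int) (i : Int) : Prop := 1 ≤ i
instance (x : List Int) (i : Int) : Decidable (Pre_kron_power x i) := by unfold Pre_kron_power; infer_instance
def pvWitness_kron_power : List Int × Int := ([1, -2], 3)

def Spec_kron_power (x : List Int) (i : Int) (out : List Int) : Prop := out = kron_power_alt x i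
instance (x : List Int) (i : Int) (out : List Int) : Decidable (Spec_kron_power x i out) := by unfold Spec_kron_power; infer_instance

-- ===== CLAIM (what is proved, stated in full; the proofs are below) =====
def Claim_equal_kron_power : Prop := ∀ (x : List Int) (i : Int), Dom_kron_power x i → Pre_kron_power x i → Spec_kron_power x i (kron_power x i)

-- ===== LEMMAS AND PROOFS =====

-- A's index-based iteration over l equals direct iteration over l's values.
lemma map_range_getD {α : Type} (l : List Int) (f : Int → α) :
    (List.range l.length).map (fun j => f (l.getD j 0)) = l.map f := by
  apply List.ext_getElem
  · simp
  · intro n h1 h2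
    have hn : n < l.length := by simpa using h2
    simp [List.getElem?_eq_getElem hn]

lemma kron_prod_eq (x y : List Int) : kron_prodA x y = kron_prodB x y := by
  unfold kron_prodA kron_prodB
  rw [List.flatMap_def, List.flatMap_def]
  congr 1
  rw [show (fun i => (List.range y.length).map (fun j => x.getD i 0 * y.getD j 0))
        = (fun i => y.map (fun b => x.getD i 0 * b)) from
      funext (fun i => map_range_getD y (fun b => x.getD i 0 * b))]
  exact map_range_getD x (fun a => y.map (fun b => a * b))

-- the loop commutes with one more product
lemma kronLoop_prod (x r : List Int) (k : Int) :
    kronLoop x (kron_prodB x r) k = kron_prodB x (kronLoop x r k) := by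
  by_cases h : k > 1
  · conv_lhs => rw [kronLoop, if_pos h]
    conv_rhs => rw [kronLoop, if_pos h]
    exact kronLoop_prod x (kron_prodB x r) (k - 1)
  · conv_lhs => rw [kronLoop, if_neg h]
    conv_rhs => rw [kronLoop, if_neg h]
termination_by k.toNat
decreasing_by omega

lemma kron_power_eq_loop_aux (x : List Int) (n : Nat) :
    ∀ i : Int, i.toNat = n → 1 ≤ i → kron_power x i = kronLoop x x i := by
  induction n using Nat.strong_induction_on with
  | _ n ih =>
  intro i hn h
  by_cases h3 : i > 2
  · rw [kron_power, if_pos h3]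
    conv_rhs => rw [kronLoop, if_pos (show i > 1 by omega)]
    rw [kronLoop_prod, kron_prod_eq, ih (i - 1).toNat (by omega) (i - 1) rfl (by omega)]
  · by_cases h2 : i = 2
    · subst h2
      rw [kron_power]
      norm_num
      rw [kronLoop]
      norm_num
      rw [kronLoop]
      norm_num
      exact kron_prod_eq x x
    · have h1 : i = 1 := by omega
      subst h1
      rw [kron_power, kronLoop]
      norm_num

lemma kron_power_eq_loop (x : List Int) (i : Int) (h : 1 ≤ i) :
    kron_power x i = kronLoop x x i :=
  kron_power_eq_loop_aux x i.toNat i rfl h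

-- ===== VERDICT (by name: the statement is the Claim_ definition above) =====
theorem kron_power_spec : Claim_equal_kron_power := by
  intro x i _ hpre
  have h1 : (1 : Int) ≤ i := hpre
  unfold Spec_kron_power kron_power_alt
  rw [if_neg (by omega : ¬ i < 1)]
  exact kron_power_eq_loop x i h1
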